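-- pv_equiv track=rewrite | github.com/VanLinh2801/amazon-recommender | scripts/embedding/data_preprocessing/filter_embedding_eligible.py | has_face_without_makeup_context
-- ===== SOURCE A (Python) =====
-- FACE_MAKEUP_KEYWORDS = {
--     'makeup', 'make up',
--     'paint',  # face paint
--     'foundation',  # face foundation
--     'concealer',  # face concealer
--     # Skincare products hợp lệ
--     'wash',  # face wash
--     'cleanser',  # face cleanser
--     'serum',  # face serum
--     'cream',  # face cream
--     'lotion',  # face lotion
--     'moisturizer', 'moisturiser',  # face moisturizer
--     'toner',  # face toner
--     'mask',  # face mask (skincare, nhưng cần cẩn thận với negative keywords)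
--     'scrub',  # face scrub
--     'exfoliant', 'exfoliating',  # face exfoliant
--     'sunscreen', 'sun screen'  # face sunscreen
-- }
--
-- def has_face_without_makeup_context(title: str) -> bool:
--     """
--     Kiểm tra title có từ "face" nhưng không có context makeup không.
--
--     Rule: Nếu title chứa "face" nhưng không chứa makeup-related words
--     (makeup, paint, foundation, concealer) → có thể là face mask/covering
--     không phải makeup product.
--
--     Args:
--         title: Title đã clean (lowercase)
--
--     Returns:
--         True nếu có "face" nhưng không có makeup context, False nếu không
--     """
--     if not title or not isinstance(title, str):
--         return False
--
--     title_lower = title.lower()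
--     tokens = set(title_lower.split())
--
--     # Kiểm tra có từ "face" không
--     if 'face' not in tokens and 'face' not in title_lower:
--         return False
--
--     # Kiểm tra có makeup-related words không
--     has_makeup_context = False
--     for keyword in FACE_MAKEUP_KEYWORDS:
--         keyword_lower = keyword.lower()
--
--         # Match exact token
--         if keyword_lower in tokens:
--             has_makeup_context = True
--             break
--
--         # Match multi-word (như "make up")
--         if ' ' in keyword_lower:
--             if keyword_lower in title_lower:
--                 has_makeup_context = True
--                 break
--
--     # Nếu có "face" nhưng không có makeup context → có thể là face mask
--     return not has_makeup_context
-- ===== SOURCE B (Python) =====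
-- FACE_MAKEUP_KEYWORDS = {
--     'makeup', 'make up',
--     'paint',
--     'foundation',
--     'concealer',
--     'wash',
--     'cleanser',
--     'serum',
--     'cream',
--     'lotion',
--     'moisturizer', 'moisturiser',
--     'toner',
--     'mask',
--     'scrub',
--     'exfoliant', 'exfoliating',
--     'sunscreen', 'sun screen'
-- }
--
-- # Multi-word keywords can never be a single token, so they are the only ones
-- # that still need a substring check after the token pass.
-- _MULTI_WORD = [k for k in FACE_MAKEUP_KEYWORDS if ' ' in k]
--
--
-- def has_face_without_makeup_context(title: str) -> bool:
--     if not title or not isinstance(title, str):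
--         return False
--     tl = title.lower()
--     # Single title-driven pass over the tokens: bail out as soon as a token is a
--     # makeup keyword (the result is False then whether or not 'face' occurs),
--     # while remembering whether the token 'face' was seen.
--     saw_face = False
--     for w in tl.split():
--         if w in FACE_MAKEUP_KEYWORDS:
--             return False
--         if w == 'face':
--             saw_face = True
--     if not saw_face and 'face' not in tl:
--         return False
--     return all(m not in tl for m in _MULTI_WORD)
-- ===== Notes on version B (the rewrite author's own statement) =====
-- stated objective: alternative
-- what changed: B inverts the scan direction: instead of A's keyword-driven loop testing each of the 19 keywords against the token set with a break flag, B makes one title-driven pass over the title's tokens (early-returning False on any makeup-keyword token, tracking whether the 'face' token was seen) and then checks only the two multi-word phrases as substrings.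
import Mathlib
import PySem

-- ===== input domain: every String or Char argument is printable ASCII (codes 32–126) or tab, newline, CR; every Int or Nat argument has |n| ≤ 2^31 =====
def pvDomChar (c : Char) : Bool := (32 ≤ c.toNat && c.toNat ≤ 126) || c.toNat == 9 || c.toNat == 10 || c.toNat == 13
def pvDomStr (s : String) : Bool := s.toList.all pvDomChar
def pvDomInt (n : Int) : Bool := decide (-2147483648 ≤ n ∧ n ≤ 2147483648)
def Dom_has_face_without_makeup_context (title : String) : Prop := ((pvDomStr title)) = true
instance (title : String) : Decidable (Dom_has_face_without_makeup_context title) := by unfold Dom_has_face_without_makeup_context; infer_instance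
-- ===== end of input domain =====

-- B inverts the scan direction: a single title-driven pass over the title's tokens (early exit on a
-- makeup-keyword token, remembering the 'face' token) followed by a substring check of only the two
-- multi-word phrases, instead of A's keyword-driven loop with a flag (objective: alternative).

-- ===== PORT A =====
-- the FACE_MAKEUP_KEYWORDS set literal, in source order
def pvFaceMakeupKeywords : List String :=
  ["makeup", "make up", "paint", "foundation", "concealer", "wash", "cleanser", "serum", "cream", "lotion", "moisturizer", "moisturiser", "toner", "mask", "scrub", "exfoliant", "exfoliating", "sunscreen", "sun screen"]

-- A's 'for keyword in FACE_MAKEUP_KEYWORDS: … break' loop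
def pvLoopA (tokens : PySem.Set String) (title_lower : String) : List String → Bool
  | [] => false
  | keyword :: rest =>
    let keyword_lower := PySem.Str.lower keyword
    if tokens.contains keyword_lower then true
    else if PySem.Str.isIn " " keyword_lower then
      if PySem.Str.isIn keyword_lower title_lower then true
      else pvLoopA tokens title_lower rest
    else pvLoopA tokens title_lower rest

def has_face_without_makeup_context (title : String) : Bool :=
  if title = "" then false
  else if !((PySem.Set.ofList (PySem.Str.split₀ (PySem.Str.lower title)) : PySem.Set String).contains "face")
        && !(PySem.Str.isIn "face" (PySem.Str.lower title)) then false
  else !(pvLoopA (PySem.Set.ofList (PySem.Str.split₀ (PySem.Str.lower title))) (PySem.Str.lower title) pvFaceMakeupKeywords)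

-- ===== PORT B =====
-- the _MULTI_WORD comprehension
def pvMultiWord : List String := pvFaceMakeupKeywords.filter (fun k => PySem.Str.isIn " " k)

-- B's 'for w in tl.split(): …' pass: none = the early 'return False', some sawFace = loop finished
def pvScanB : List String → Bool → Option Bool
  | [], sawFace => some sawFace
  | w :: rest, sawFace =>
    if pvFaceMakeupKeywords.contains w then none
    else pvScanB rest (sawFace || (w == "face"))

def has_face_without_makeup_context_alt (title : String) : Bool :=
  if title = "" then false
  else
    let tl := PySem.Str.lower title
    match pvScanB (PySem.Str.split₀ tl) false with
    | none => false
    | some sawFace =>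
      if !sawFace && !(PySem.Str.isIn "face" tl) then false
      else pvMultiWord.all (fun m => !(PySem.Str.isIn m tl))

-- ===== PRECONDITION & SPEC =====
def Spec_has_face_without_makeup_context (title : String) (out : Bool) : Prop := out = has_face_without_makeup_context_alt title
instance (title : String) (out : Bool) : Decidable (Spec_has_face_without_makeup_context title out) := by unfold Spec_has_face_without_makeup_context; infer_instance

-- ===== CLAIM (what is proved, stated in full; the proofs are below) =====
def Claim_equal_has_face_without_makeup_context : Prop := ∀ (title : String), Dom_has_face_without_makeup_context title → Spec_has_face_without_makeup_context title (has_face_without_makeup_context title)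

-- ===== LEMMAS AND PROOFS =====

-- the single-word keywords, as a literal (proof helper)
def pvSingles : List String :=
  ["makeup", "paint", "foundation", "concealer", "wash", "cleanser", "serum", "cream", "lotion", "moisturizer", "moisturiser", "toner", "mask", "scrub", "exfoliant", "exfoliating", "sunscreen"]

-- closed-form evaluations of the loop's per-keyword operations on the keyword literals
lemma pvLow_0 : PySem.Str.lower "makeup" = "makeup" := by decide
lemma pvLow_1 : PySem.Str.lower "make up" = "make up" := by decide
lemma pvLow_2 : PySem.Str.lower "paint" = "paint" := by decide
lemma pvLow_3 : PySem.Str.lower "foundation" = "foundation" := by decide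
lemma pvLow_4 : PySem.Str.lower "concealer" = "concealer" := by decide
lemma pvLow_5 : PySem.Str.lower "wash" = "wash" := by decide
lemma pvLow_6 : PySem.Str.lower "cleanser" = "cleanser" := by decide
lemma pvLow_7 : PySem.Str.lower "serum" = "serum" := by decide
lemma pvLow_8 : PySem.Str.lower "cream" = "cream" := by decide
lemma pvLow_9 : PySem.Str.lower "lotion" = "lotion" := by decide
lemma pvLow_10 : PySem.Str.lower "moisturizer" = "moisturizer" := by decide
lemma pvLow_11 : PySem.Str.lower "moisturiser" = "moisturiser" := by decide
lemma pvLow_12 : PySem.Str.lower "toner" = "toner" := by decide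
lemma pvLow_13 : PySem.Str.lower "mask" = "mask" := by decide
lemma pvLow_14 : PySem.Str.lower "scrub" = "scrub" := by decide
lemma pvLow_15 : PySem.Str.lower "exfoliant" = "exfoliant" := by decide
lemma pvLow_16 : PySem.Str.lower "exfoliating" = "exfoliating" := by decide
lemma pvLow_17 : PySem.Str.lower "sunscreen" = "sunscreen" := by decide
lemma pvLow_18 : PySem.Str.lower "sun screen" = "sun screen" := by decide
lemma pvSp_0 : PySem.Str.isIn " " "makeup" = false := by decide
lemma pvSp_1 : PySem.Str.isIn " " "make up" = true := by decide
lemma pvSp_2 : PySem.Str.isIn " " "paint" = false := by decide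
lemma pvSp_3 : PySem.Str.isIn " " "foundation" = false := by decide
lemma pvSp_4 : PySem.Str.isIn " " "concealer" = false := by decide
lemma pvSp_5 : PySem.Str.isIn " " "wash" = false := by decide
lemma pvSp_6 : PySem.Str.isIn " " "cleanser" = false := by decide
lemma pvSp_7 : PySem.Str.isIn " " "serum" = false := by decide
lemma pvSp_8 : PySem.Str.isIn " " "cream" = false := by decide
lemma pvSp_9 : PySem.Str.isIn " " "lotion" = false := by decide
lemma pvSp_10 : PySem.Str.isIn " " "moisturizer" = false := by decide
lemma pvSp_11 : PySem.Str.isIn " " "moisturiser" = false := by decide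
lemma pvSp_12 : PySem.Str.isIn " " "toner" = false := by decide
lemma pvSp_13 : PySem.Str.isIn " " "mask" = false := by decide
lemma pvSp_14 : PySem.Str.isIn " " "scrub" = false := by decide
lemma pvSp_15 : PySem.Str.isIn " " "exfoliant" = false := by decide
lemma pvSp_16 : PySem.Str.isIn " " "exfoliating" = false := by decide
lemma pvSp_17 : PySem.Str.isIn " " "sunscreen" = false := by decide
lemma pvSp_18 : PySem.Str.isIn " " "sun screen" = true := by decide

lemma pvMultiWord_eval : pvMultiWord = ["make up", "sun screen"] := by decide

-- A's early-exit loop is the 'any' of its per-keyword test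
lemma pvLoopA_eq_any (tokens : PySem.Set String) (tl : String) (ks : List String) :
    pvLoopA tokens tl ks = ks.any (fun k =>
      tokens.contains (PySem.Str.lower k)
        || (PySem.Str.isIn " " (PySem.Str.lower k) && PySem.Str.isIn (PySem.Str.lower k) tl)) := by
  induction ks with
  | nil => rfl
  | cons k rest ih =>
    simp only [pvLoopA, List.any_cons]
    split_ifs with h1 h2 h3
    · rw [h1]; simp
    · simp only [Bool.not_eq_true] at h1
      rw [h1, h2, h3]; simp
    · simp only [Bool.not_eq_true] at h1 h3
      rw [ih, h1, h2, h3]; simp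
    · simp only [Bool.not_eq_true] at h1 h2
      rw [ih, h1, h2]; simp

-- words produced by str.split() contain no space character
lemma pvGoNoSpace : ∀ (s cur : List Char) (acc : List (List Char)),
    (∀ w ∈ acc, ' ' ∉ w) → (' ' ∉ cur) →
    ∀ w ∈ PySem.Chars.split₀.go s cur acc, ' ' ∉ w := by
  intro s
  induction s with
  | nil =>
    intro cur acc hacc hcur w hw
    simp only [PySem.Chars.split₀.go] at hw
    split at hw
    · exact hacc w (List.mem_reverse.mp hw)
    · rcases List.mem_cons.mp (List.mem_reverse.mp hw) with h | h
      · subst h; simpa using hcur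
      · exact hacc w h
  | cons c rest ih =>
    intro cur acc hacc hcur w hw
    simp only [PySem.Chars.split₀.go] at hw
    split at hw
    · split at hw
      · exact ih [] acc hacc (by simp) w hw
      · refine ih [] (cur.reverse :: acc) ?_ (by simp) w hw
        intro v hv
        rcases List.mem_cons.mp hv with h | h
        · subst h; simpa using hcur
        · exact hacc v h
    · rename_i hc
      refine ih (c :: cur) acc hacc ?_ w hw
      intro hmem
      rcases List.mem_cons.mp hmem with h | h
      · exact hc (by rw [← h]; decide)
      · exact hcur h

lemma pvSplitNoSpace (t w : String) (hw : w ∈ PySem.Str.split₀ t) : ' ' ∉ w.toList := by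
  simp only [PySem.Str.split₀, List.mem_map] at hw
  obtain ⟨cs, hcs, rfl⟩ := hw
  have hno : ' ' ∉ cs := pvGoNoSpace t.toList [] [] (by simp) (by simp) cs hcs
  simpa using hno

-- Bool form of Set.ofList membership
lemma pvSetContains (l : List String) (x : String) :
    (PySem.Set.ofList l : PySem.Set String).contains x = l.contains x := by
  rw [Bool.eq_iff_iff]
  simp only [List.contains_iff_mem]
  constructor
  · intro h
    have : x ∈ (PySem.Set.ofList l : PySem.Set String) := by simpa using h
    exact (PySem.Set.mem_ofList _ _).mp this
  · intro h
    simpa using (PySem.Set.mem_ofList _ _).mpr h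

-- the token-driven and keyword-driven single-word scans agree on space-free token lists
lemma pvScanDirections (toks : List String) (hns : ∀ w ∈ toks, ' ' ∉ w.toList) :
    toks.any (fun w => pvFaceMakeupKeywords.contains w)
      = pvSingles.any (fun k => (PySem.Set.ofList toks : PySem.Set String).contains k) := by
  rw [Bool.eq_iff_iff]
  simp only [List.any_eq_true, pvSetContains, List.contains_iff_mem]
  constructor
  · rintro ⟨w, hw, hkw⟩
    refine ⟨w, ?_, hw⟩
    have hns' := hns w hw
    simp only [pvFaceMakeupKeywords, List.mem_cons, List.not_mem_nil, or_false] at hkw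
    rcases hkw with rfl|rfl|rfl|rfl|rfl|rfl|rfl|rfl|rfl|rfl|rfl|rfl|rfl|rfl|rfl|rfl|rfl|rfl|rfl
    all_goals first
      | decide
      | (exact absurd (by decide) hns')
  · rintro ⟨k, hk, htok⟩
    refine ⟨k, htok, ?_⟩
    have : ∀ x ∈ pvSingles, x ∈ pvFaceMakeupKeywords := by decide
    exact this k hk
-- characterization of B's token pass
lemma pvScanB_eq (ws : List String) (s : Bool) :
    pvScanB ws s = if ws.any (fun w => pvFaceMakeupKeywords.contains w) then none
                   else some (s || ws.contains "face") := by
  induction ws generalizing s with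
  | nil => simp [pvScanB]
  | cons w rest ih =>
    have hbc : (w == "face") = ("face" == w) := by
      rw [Bool.eq_iff_iff]; simp only [beq_iff_eq]; exact eq_comm
    cases h : pvFaceMakeupKeywords.contains w with
    | true => simp only [pvScanB, List.any_cons, h]; simp
    | false =>
      simp only [pvScanB, List.any_cons, h, Bool.false_or,
        if_neg Bool.false_ne_true, ih]
      split_ifs with h2
      · rfl
      · rw [List.contains_cons, ← hbc, Bool.or_assoc]

-- A's keyword-driven loop, rewritten as the single-word token-set probes plus the two phrase checks
set_option maxHeartbeats 1000000 in
lemma pvLoop_eq (toks : List String) (tl : String) (hns : ∀ w ∈ toks, ' ' ∉ w.toList) :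
    pvLoopA (PySem.Set.ofList toks) tl pvFaceMakeupKeywords
      = (pvSingles.any (fun k => (PySem.Set.ofList toks : PySem.Set String).contains k)
          || (PySem.Str.isIn "make up" tl || PySem.Str.isIn "sun screen" tl)) := by
  rw [pvLoopA_eq_any]
  simp only [pvFaceMakeupKeywords, pvSingles, List.any_cons, List.any_nil,
    pvLow_0, pvLow_1, pvLow_2, pvLow_3, pvLow_4, pvLow_5, pvLow_6, pvLow_7, pvLow_8, pvLow_9,
    pvLow_10, pvLow_11, pvLow_12, pvLow_13, pvLow_14, pvLow_15, pvLow_16, pvLow_17, pvLow_18,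
    pvSp_0, pvSp_1, pvSp_2, pvSp_3, pvSp_4, pvSp_5, pvSp_6, pvSp_7, pvSp_8, pvSp_9,
    pvSp_10, pvSp_11, pvSp_12, pvSp_13, pvSp_14, pvSp_15, pvSp_16, pvSp_17, pvSp_18,
    Bool.false_and, Bool.true_and, Bool.or_false]
  -- the two multi-word keywords' token-set probes are always false (tokens have no space)
  have h1 : (PySem.Set.ofList toks : PySem.Set String).contains "make up" = false := by
    rw [pvSetContains, ← Bool.not_eq_true, List.contains_iff_mem]
    intro hmem; exact hns _ hmem (by decide)
  have h2 : (PySem.Set.ofList toks : PySem.Set String).contains "sun screen" = false := by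
    rw [pvSetContains, ← Bool.not_eq_true, List.contains_iff_mem]
    intro hmem; exact hns _ hmem (by decide)
  rw [h1, h2]
  simp only [Bool.false_or]
  ac_rfl

-- B's result, with the token pass evaluated, as a two-stage if (non-empty titles)
lemma pvAlt_eq (title : String) (h0 : ¬ title = "") :
    has_face_without_makeup_context_alt title =
      (if (PySem.Str.split₀ (PySem.Str.lower title)).any (fun w => pvFaceMakeupKeywords.contains w) then false
       else if (!(PySem.Str.split₀ (PySem.Str.lower title)).contains "face"
                  && !PySem.Str.isIn "face" (PySem.Str.lower title)) then false
       else pvMultiWord.all (fun m => !(PySem.Str.isIn m (PySem.Str.lower title)))) := by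
  unfold has_face_without_makeup_context_alt
  rw [if_neg h0]
  show (match pvScanB (PySem.Str.split₀ (PySem.Str.lower title)) false with
        | none => false
        | some sawFace =>
          if (!sawFace && !PySem.Str.isIn "face" (PySem.Str.lower title)) = true then false
          else pvMultiWord.all fun m => !PySem.Str.isIn m (PySem.Str.lower title)) = _
  rw [pvScanB_eq]
  by_cases h : (PySem.Str.split₀ (PySem.Str.lower title)).any (fun w => pvFaceMakeupKeywords.contains w) = true
  · rw [if_pos h, if_pos h]
  · rw [if_neg h, if_neg h]
    show (if (!(false || (PySem.Str.split₀ (PySem.Str.lower title)).contains "face")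
              && !PySem.Str.isIn "face" (PySem.Str.lower title)) = true then false
          else pvMultiWord.all (fun m => !(PySem.Str.isIn m (PySem.Str.lower title)))) = _
    rw [Bool.false_or]

-- ===== VERDICT (by name: the statement is the Claim_ definition above) =====
theorem has_face_without_makeup_context_spec : Claim_equal_has_face_without_makeup_context := by
  intro title _hdom
  unfold Spec_has_face_without_makeup_context
  by_cases h0 : title = ""
  · simp [has_face_without_makeup_context, has_face_without_makeup_context_alt, h0]
  · have hns : ∀ w ∈ PySem.Str.split₀ (PySem.Str.lower title), ' ' ∉ w.toList :=
      fun w hw => pvSplitNoSpace _ w hw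
    unfold has_face_without_makeup_context
    rw [if_neg h0, pvAlt_eq title h0, pvScanDirections _ hns, pvLoop_eq _ _ hns, pvMultiWord_eval,
      pvSetContains (PySem.Str.split₀ (PySem.Str.lower title)) "face"]
    by_cases hT : (pvSingles.any fun k =>
        (PySem.Set.ofList (PySem.Str.split₀ (PySem.Str.lower title)) : PySem.Set String).contains k) = true
    · -- a title token is a makeup keyword: both sides are False
      rw [hT, if_pos rfl]
      simp only [Bool.true_or, Bool.not_true]
      split_ifs <;> rfl
    · simp only [Bool.not_eq_true] at hT
      rw [hT, if_neg (show ¬(false = true) by decide), Bool.false_or]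
      split_ifs with hg
      · rfl
      · simp only [List.all_cons, List.all_nil, Bool.not_or, Bool.and_true]
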